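-- pv_equiv track=rewrite | github.com/RishabhS21/col106_assignments | a4/a4.py | getWildHash2
-- ===== SOURCE A (Python) =====
-- def getWildHash2(s,n,w,q):
-- 	hashVal=0
-- 	fac = 1
-- 	for i in range(n-1, -1, -1):
-- 		'''hashVal will be our final value of f(s) mod q, f(s) as mentioned in a4.pdf, starting from least significant i.e. s[n-1]
--   		with handling '?' character'''
-- 		# time complexity: O(len(s))
-- 		if (i==w):
-- 			fac=fac*26%q
-- 			continue
-- 		hashVal = (hashVal + fac*(ord(s[i])-65)) % q
-- 		fac=fac*26 % q
-- 	return hashVal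
-- ===== SOURCE B (Python) =====
-- def getWildHash2(s, n, w, q):
--     # Horner's rule, scanning forward; the repeated *26 carries the positional
--     # weight, so no power accumulator is needed.
--     hashVal = 0
--     for i in range(n):
--         term = 0 if i == w else ord(s[i]) - 65
--         hashVal = (hashVal * 26 + term) % q
--     return hashVal
-- ===== Notes on version B (the rewrite author's own statement) =====
-- stated objective: idiomatic
-- what changed: Replaces A's backward scan with an explicit power accumulator (fac = 26^k mod q) by a forward Horner evaluation hashVal = (hashVal*26 + term) % q, eliminating the fac variable entirely.
import Mathlib
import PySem

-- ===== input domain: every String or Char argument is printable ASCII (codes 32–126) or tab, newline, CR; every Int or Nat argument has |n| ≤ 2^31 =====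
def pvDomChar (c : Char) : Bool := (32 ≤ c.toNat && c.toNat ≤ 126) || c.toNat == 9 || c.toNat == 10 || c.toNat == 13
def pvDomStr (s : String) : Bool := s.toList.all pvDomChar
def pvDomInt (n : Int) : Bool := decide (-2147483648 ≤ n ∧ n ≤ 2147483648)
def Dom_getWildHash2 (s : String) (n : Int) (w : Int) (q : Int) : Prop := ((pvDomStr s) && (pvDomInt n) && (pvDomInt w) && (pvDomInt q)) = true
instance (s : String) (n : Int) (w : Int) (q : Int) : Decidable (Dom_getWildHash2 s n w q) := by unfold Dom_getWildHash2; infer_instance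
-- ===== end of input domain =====

-- B replaces A's backward scan with a power accumulator by a forward Horner evaluation
-- (hashVal = hashVal*26 + term each step, no `fac`); objective: idiomatic/simpler, same O(n).

-- ===== PORT A =====
-- Backward loop i = n-1,…,0 carrying (hashVal, fac); skips i = w but still multiplies fac.
def getWildHash2 (s : String) (n : Int) (w : Int) (q : Int) : Int :=
  ((PySem.List.pyRange (n-1) (-1) (-1)).foldl
    (fun (st : Int × Int) i =>
      if i = w then (st.1, PySem.Int.mod (st.2 * 26) q)
      else (PySem.Int.mod (st.1 + st.2 * ((((PySem.Str.pyGet? s i).getD 'A').toNat : Int) - 65)) q,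
            PySem.Int.mod (st.2 * 26) q))
    (0, 1)).1

-- ===== PORT B =====
-- Forward Horner loop i = 0,…,n-1; term is 0 at the wildcard position.
def getWildHash2_alt (s : String) (n : Int) (w : Int) (q : Int) : Int :=
  (PySem.List.pyRange 0 n 1).foldl
    (fun hashVal i =>
      PySem.Int.mod (hashVal * 26 +
        (if i = w then 0 else (((PySem.Str.pyGet? s i).getD 'A').toNat : Int) - 65)) q)
    0

-- ===== PRECONDITION & SPEC =====
-- Pre_ = exactly the inputs where Python A returns: an empty loop (n ≤ 0), or q ≠ 0 and every
-- accessed index < len(s) (all of 0..n-1 except the skipped wildcard w); outside, A raises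
-- ZeroDivisionError or IndexError.
def Pre_getWildHash2 (s : String) (n : Int) (w : Int) (q : Int) : Prop :=
  n ≤ 0 ∨ (q ≠ 0 ∧ (n ≤ PySem.Str.len s ∨ (n = PySem.Str.len s + 1 ∧ w = PySem.Str.len s)))
instance (s : String) (n : Int) (w : Int) (q : Int) : Decidable (Pre_getWildHash2 s n w q) := by unfold Pre_getWildHash2; infer_instance
def pvWitness_getWildHash2 : String × Int × Int × Int := ("CAB?Z", 5, 3, 97)

def Spec_getWildHash2 (s : String) (n : Int) (w : Int) (q : Int) (out : Int) : Prop := out = getWildHash2_alt s n w q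
instance (s : String) (n : Int) (w : Int) (q : Int) (out : Int) : Decidable (Spec_getWildHash2 s n w q out) := by unfold Spec_getWildHash2; infer_instance

-- ===== CLAIM (what is proved, stated in full; the proofs are below) =====
def Claim_equal_getWildHash2 : Prop := ∀ (s : String) (n : Int) (w : Int) (q : Int), Dom_getWildHash2 s n w q → Pre_getWildHash2 s n w q → Spec_getWildHash2 s n w q (getWildHash2 s n w q)

-- ===== LEMMAS AND PROOFS =====

-- the value contributed by position i (0 at the wildcard), shared vocabulary of both ports
def pvTerm (s : String) (w i : Int) : Int :=
  if i = w then 0 else (((PySem.Str.pyGet? s i).getD 'A').toNat : Int) - 65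

-- the (un-reduced) polynomial value of a list of positions, least-significant first
def pvR (s : String) (w : Int) : List Int → Int
  | [] => 0
  | i :: l => pvTerm s w i + 26 * pvR s w l

theorem pvR_append (s : String) (w : Int) (u : List Int) (i : Int) :
    pvR s w (u ++ [i]) = pvR s w u + 26 ^ u.length * pvTerm s w i := by
  induction u with
  | nil => simp [pvR]
  | cons a v ih => simp [pvR, ih, pow_succ]; ring

theorem fmod_absorb_mul (a d e q : Int) : (a + (d.fmod q) * e).fmod q = (a + d * e).fmod q := by
  rw [Int.add_fmod a ((d.fmod q) * e) q, Int.mul_fmod (d.fmod q) e q,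
    Int.fmod_fmod_of_dvd d dvd_rfl, ← Int.mul_fmod, ← Int.add_fmod]

theorem foldA_inv (s : String) (w q : Int) (l : List Int) : ∀ (x c : Int),
    ((l.foldl
      (fun (st : Int × Int) i =>
        if i = w then (st.1, PySem.Int.mod (st.2 * 26) q)
        else (PySem.Int.mod (st.1 + st.2 * ((((PySem.Str.pyGet? s i).getD 'A').toNat : Int) - 65)) q,
              PySem.Int.mod (st.2 * 26) q))
      (Int.fmod x q, c)).1) = Int.fmod (x + c * pvR s w l) q := by
  induction l with
  | nil => intro x c; simp [pvR]
  | cons i l ih =>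
    intro x c
    simp only [PySem.Int.mod] at ih ⊢
    by_cases hi : i = w
    · simp only [List.foldl_cons, hi, ite_true]
      rw [ih x ((c * 26).fmod q)]
      rw [fmod_absorb_mul x (c * 26) (pvR s w l) q]
      have hw : pvTerm s w w = 0 := by simp [pvTerm]
      simp only [pvR, hw]
      ring_nf
    · simp only [List.foldl_cons, if_neg hi]
      rw [Int.fmod_add_fmod x q (c * ((((PySem.Str.pyGet? s i).getD 'A').toNat : Int) - 65))]
      rw [ih (x + c * ((((PySem.Str.pyGet? s i).getD 'A').toNat : Int) - 65)) ((c * 26).fmod q)]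
      rw [fmod_absorb_mul _ (c * 26) (pvR s w l) q]
      have ht : pvTerm s w i = (((PySem.Str.pyGet? s i).getD 'A').toNat : Int) - 65 := by
        simp [pvTerm, hi]
      simp only [pvR, ht]
      ring_nf

theorem foldB_inv (s : String) (w q : Int) (l : List Int) : ∀ (x : Int),
    l.foldl
      (fun hashVal i =>
        PySem.Int.mod (hashVal * 26 +
          (if i = w then 0 else (((PySem.Str.pyGet? s i).getD 'A').toNat : Int) - 65)) q)
      (Int.fmod x q)
    = Int.fmod (l.foldl (fun a i => a * 26 + pvTerm s w i) x) q := by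
  induction l with
  | nil => intro x; simp
  | cons i l ih =>
    intro x
    simp only [PySem.Int.mod] at ih ⊢
    simp only [List.foldl_cons]
    have h1 : ((x.fmod q) * 26 + pvTerm s w i).fmod q = Int.fmod (x * 26 + pvTerm s w i) q := by
      rw [Int.add_fmod, Int.mul_fmod (x.fmod q) 26 q, Int.fmod_fmod_of_dvd x dvd_rfl,
        ← Int.mul_fmod, ← Int.add_fmod]
    simp only [pvTerm] at h1
    rw [h1, ih (x * 26 + (if i = w then 0 else (((PySem.Str.pyGet? s i).getD 'A').toNat : Int) - 65))]
    simp [pvTerm]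

theorem horner_rev (s : String) (w : Int) (l : List Int) : ∀ (x : Int),
    l.foldl (fun a i => a * 26 + pvTerm s w i) x = x * 26 ^ l.length + pvR s w l.reverse := by
  induction l with
  | nil => intro x; simp [pvR]
  | cons i l ih =>
    intro x
    simp only [List.foldl_cons, ih, List.reverse_cons, pvR_append, List.length_reverse,
      List.length_cons]
    ring

-- ===== VERDICT (by name: the statement is the Claim_ definition above) =====
theorem getWildHash2_spec : Claim_equal_getWildHash2 := by
  intro s n w q _ _
  unfold Spec_getWildHash2 getWildHash2 getWildHash2_alt
  rw [PySem.List.pyRange_neg_one_eq_reverse (n-1) (-1)]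
  have hr : (-1 : Int) + 1 = 0 := by norm_num
  have hr2 : (n - 1) + 1 = n := by ring
  rw [hr, hr2]
  have hA := foldA_inv s w q ((PySem.List.pyRange 0 n).reverse) 0 1
  rw [Int.zero_fmod] at hA
  have hB := foldB_inv s w q (PySem.List.pyRange 0 n) 0
  rw [Int.zero_fmod] at hB
  rw [hA, hB, horner_rev s w (PySem.List.pyRange 0 n) 0]
  ring_nf
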